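-- pv_equiv track=rewrite | github.com/ict-cspark/Algorithm | 프로그래머스/unrated/181864. 문자열 바꿔서 찾기/문자열 바꿔서 찾기.py | solution
-- ===== SOURCE A (Python) =====
-- def solution(myString, pat):
--     word = ""
--     for alph in myString:
--         if alph == 'A':
--             word += 'B'
--         else:
--             word += 'A'
--
--     if pat in word:
--         answer = 1
--     else:
--         answer = 0
--     return answer
-- ===== SOURCE B (Python) =====
-- def _matches(c, p):
--     # pat char p matches source char c iff p equals the swapped image of c
--     return p == 'B' if c == 'A' else p == 'A'
--
--
-- def solution(myString, pat):
--     n, m = len(myString), len(pat)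
--     for i in range(n - m + 1):
--         if all(_matches(myString[i + j], pat[j]) for j in range(m)):
--             return 1
--     return 0
-- ===== Notes on version B (the rewrite author's own statement) =====
-- stated objective: faster
-- what changed: B builds no transformed copy of myString: it slides the pattern over the untouched input, checking each window character-wise against the swap rule with early exit, while A constructs the swapped string with quadratic += concatenation and then runs a substring test.
import Mathlib
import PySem

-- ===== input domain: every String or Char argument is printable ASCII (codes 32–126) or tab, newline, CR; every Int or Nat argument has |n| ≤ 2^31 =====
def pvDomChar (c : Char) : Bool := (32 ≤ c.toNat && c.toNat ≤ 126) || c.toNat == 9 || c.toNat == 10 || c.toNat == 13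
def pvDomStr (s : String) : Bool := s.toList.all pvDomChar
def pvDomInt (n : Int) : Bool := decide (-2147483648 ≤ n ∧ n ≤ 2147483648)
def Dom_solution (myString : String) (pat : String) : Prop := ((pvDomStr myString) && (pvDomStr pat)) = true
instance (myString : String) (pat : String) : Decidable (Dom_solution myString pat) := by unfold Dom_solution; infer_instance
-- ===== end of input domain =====

-- B slides the pattern over the untouched input, checking each window against the swap rule
-- char-by-char with early exit, instead of building a swapped copy of myString and doing a
-- substring test (objective: faster, measured; equivalence proved).


-- ===== PORT A =====
def solution (myString : String) (pat : String) : Int :=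
  let word : List Char :=
    myString.toList.foldl (fun w alph => w ++ [if alph = 'A' then 'B' else 'A']) []
  if PySem.Chars.isIn pat.toList word then 1 else 0

-- ===== PORT B =====
-- _matches(c, p): does pattern char p match source char c under the swap rule?
def pvMatch (c p : Char) : Bool := if c = 'A' then p = 'B' else p = 'A'

-- the `all(... for j in range(m))` window test at offset i
def pvAll (s p : List Char) (i : Nat) : Bool :=
  (List.range p.length).all fun j => pvMatch (s.getD (i + j) ' ') (p.getD j ' ')

-- the `for i in range(n - m + 1)` loop with early `return 1`
def pvScan (s p : List Char) (i : Nat) : Nat → Int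
  | 0 => 0
  | fuel + 1 => if pvAll s p i then 1 else pvScan s p (i + 1) fuel

def solution_alt (myString : String) (pat : String) : Int :=
  let s := myString.toList
  let p := pat.toList
  pvScan s p 0 (s.length + 1 - p.length)

-- ===== PRECONDITION & SPEC =====
def Spec_solution (myString : String) (pat : String) (out : Int) : Prop := out = solution_alt myString pat
instance (myString : String) (pat : String) (out : Int) : Decidable (Spec_solution myString pat out) := by unfold Spec_solution; infer_instance

-- ===== CLAIM (what is proved, stated in full; the proofs are below) =====
def Claim_equal_solution : Prop := ∀ (myString : String) (pat : String), Dom_solution myString pat → Spec_solution myString pat (solution myString pat)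

-- ===== LEMMAS AND PROOFS =====

-- the swap applied by A's loop, as a function
def pvSwap (c : Char) : Char := if c = 'A' then 'B' else 'A'

theorem pvMatch_iff (c p : Char) : pvMatch c p = true ↔ p = pvSwap c := by
  unfold pvMatch pvSwap
  split_ifs <;> simp

theorem pvAll_iff (s p : List Char) (i : Nat) (hi : i + p.length <= s.length) :
    pvAll s p i = true ↔ p <+: (s.map pvSwap).drop i := by
  rw [List.prefix_iff_eq_take]
  unfold pvAll
  simp only [List.all_eq_true, List.mem_range, pvMatch_iff]
  constructor
  · intro h
    apply List.ext_getElem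
    · simp; omega
    · intro j hj hj2
      have hjm : j < p.length := hj
      have hij : i + j < s.length := by omega
      have hv := h j hjm
      rw [List.getD_eq_getElem p ' ' hjm, List.getD_eq_getElem s ' ' hij] at hv
      simpa [List.getElem_take, List.getElem_drop, List.getElem_map] using hv
  · intro h j hj
    have hij : i + j < s.length := by omega
    rw [List.getD_eq_getElem p ' ' hj, List.getD_eq_getElem s ' ' hij]
    have := congrArg (fun l => l[j]?) h
    simpa [List.getElem?_take, List.getElem?_drop, List.getElem?_map, hj, hij,
      List.getElem?_eq_getElem] using this

theorem pvScan_eq (s p : List Char) (fuel : Nat) : ∀ i : Nat,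
    pvScan s p i fuel = if ∃ k, k < fuel ∧ pvAll s p (i + k) = true then 1 else 0 := by
  induction fuel with
  | zero => intro i; simp [pvScan]
  | succ n ih =>
    intro i
    rw [pvScan, ih (i + 1)]
    by_cases h0 : pvAll s p i = true
    · simp only [h0, if_true]
      rw [if_pos ⟨0, by omega, by simpa using h0⟩]
    · rw [if_neg h0]
      by_cases hex : ∃ k, k < n ∧ pvAll s p (i + 1 + k) = true
      · obtain ⟨k, hk, hall⟩ := hex
        rw [if_pos ⟨k, hk, hall⟩, if_pos ⟨k + 1, by omega, by rwa [show i + (k + 1) = i + 1 + k by omega]⟩]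
      · rw [if_neg hex, if_neg]
        rintro ⟨k, hk, hall⟩
        match k with
        | 0 => exact absurd (by simpa using hall) h0
        | k + 1 => exact hex ⟨k, by omega, by rwa [show i + 1 + k = i + (k + 1) by omega]⟩

-- ===== VERDICT (by name: the statement is the Claim_ definition above) =====
theorem solution_spec : Claim_equal_solution := by
  intro myString pat _
  unfold Spec_solution solution solution_alt
  have hfold : myString.toList.foldl
      (fun w alph => w ++ [if alph = 'A' then 'B' else 'A']) [] = myString.toList.map pvSwap := by
    rw [PySem.List.foldl_append_singleton_eq_map]
    simp [pvSwap]
  rw [hfold, pvScan_eq]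
  set s := myString.toList with hs
  set p := pat.toList with hp
  by_cases hIn : PySem.Chars.isIn p (s.map pvSwap) = true
  · obtain ⟨j0, hpre0⟩ := (PySem.Chars.exists_prefix_drop_iff_isIn p (s.map pvSwap)).2 hIn
    have hj : ∃ j, j + p.length ≤ s.length ∧ p <+: (s.map pvSwap).drop j := by
      by_cases hc : j0 ≤ s.length
      · have hlen : p.length ≤ ((s.map pvSwap).drop j0).length := hpre0.length_le
        simp only [List.length_drop, List.length_map] at hlen
        exact ⟨j0, by omega, hpre0⟩
      · have hlen : p.length ≤ ((s.map pvSwap).drop j0).length := hpre0.length_le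
        simp only [List.length_drop, List.length_map] at hlen
        have hnil : p = [] := List.eq_nil_of_length_eq_zero (by omega)
        exact ⟨0, by simp [hnil], by simp [hnil]⟩
    obtain ⟨j, hjle, hpre⟩ := hj
    rw [if_pos hIn, if_pos ⟨j, by omega, by
      rw [show 0 + j = j by omega]; exact (pvAll_iff s p j hjle).2 hpre⟩]
  · rw [if_neg hIn, if_neg]
    rintro ⟨k, hk, hall⟩
    have hk2 : k + p.length ≤ s.length := by omega
    rw [show 0 + k = k by omega] at hall
    exact hIn ((PySem.Chars.exists_prefix_drop_iff_isIn p (s.map pvSwap)).1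
      ⟨k, (pvAll_iff s p k hk2).1 hall⟩)
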